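-- pv_equiv track=rewrite | github.com/errantlinguist/tangrams-restricted | analysis/scripts/utterances.py | token_seq_repr
-- ===== SOURCE A (Python) =====
-- from typing import Any, Callable, Iterable, List, Optional, Sequence, Tuple
--
-- def token_seq_repr(tokens: Iterable[str]) -> str:
-- 	token_iter = iter(tokens)
-- 	formatted_tokens = []
--
-- 	next_token = __capitalize_first_char(next(token_iter))
-- 	end_reached = False
-- 	while not end_reached:
-- 		current_token = next_token
-- 		try:
-- 			next_token = next(token_iter)
-- 		except StopIteration:
-- 			current_token = current_token + '.'
-- 			end_reached = True
-- 		formatted_tokens.append(current_token)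
--
-- 	return ' '.join(formatted_tokens)
--
-- def __capitalize_first_char(string: str) -> str:
-- 	if len(string) < 2:
-- 		return string.upper()
-- 	else:
-- 		first_char = string[0]
-- 		return first_char.upper() + string[1:]
-- ===== SOURCE B (Python) =====
-- def token_seq_repr(tokens):
-- 	token_iter = iter(tokens)
-- 	first = __capitalize_first_char(next(token_iter))
-- 	rest = list(token_iter)
-- 	if not rest:
-- 		return first + '.'
-- 	rest[-1] = rest[-1] + '.'
-- 	return ' '.join([first] + rest)
--
-- def __capitalize_first_char(string: str) -> str:
-- 	if len(string) < 2:
-- 		return string.upper()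
-- 	else:
-- 		first_char = string[0]
-- 		return first_char.upper() + string[1:]
-- ===== Notes on version B (the rewrite author's own statement) =====
-- stated objective: simpler
-- what changed: Replaces the lookahead while-loop with explicit-iterator decomposition: capitalize the first token, materialize the rest with list(), append the period to the last element directly, and join once.
import Mathlib
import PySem

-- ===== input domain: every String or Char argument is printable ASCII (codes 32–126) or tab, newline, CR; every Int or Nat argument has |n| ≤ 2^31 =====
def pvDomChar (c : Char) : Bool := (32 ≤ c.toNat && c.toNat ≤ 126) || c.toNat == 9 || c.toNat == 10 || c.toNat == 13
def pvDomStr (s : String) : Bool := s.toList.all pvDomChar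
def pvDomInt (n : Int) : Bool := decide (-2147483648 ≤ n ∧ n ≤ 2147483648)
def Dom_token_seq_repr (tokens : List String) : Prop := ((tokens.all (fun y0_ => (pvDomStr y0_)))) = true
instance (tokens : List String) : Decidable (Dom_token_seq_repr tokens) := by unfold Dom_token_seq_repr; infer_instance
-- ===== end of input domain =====

-- B replaces A's lookahead while-loop by a direct decomposition (first token, rest list,
-- period appended to the last element, one join); objective: simpler.

-- ===== PORT A =====
-- __capitalize_first_char, used unchanged by both versions
def pvCapFirst (s : String) : String :=
  if PySem.Str.len s < 2 then PySem.Str.upper s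
  else match PySem.Str.pyGet? s 0 with
       | some c => PySem.Str.upper (String.ofList [c]) ++ PySem.Str.slice s (some 1) none
       | none => s  -- unreachable: len s ≥ 2

-- the while-loop: next_token is the lookahead, acc the formatted_tokens list
def pvLoopA (next_token : String) (rest : List String) (acc : List String) : List String :=
  match rest with
  | [] => acc ++ [next_token ++ "."]
  | t :: ts => pvLoopA t ts (acc ++ [next_token])

def token_seq_repr (tokens : List String) : String :=
  match tokens with
  | [] => ""  -- next() raises StopIteration here; excluded by Pre_
  | t :: ts => PySem.Str.join " " (pvLoopA (pvCapFirst t) ts [])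

-- ===== PORT B =====
def token_seq_repr_alt (tokens : List String) : String :=
  match tokens with
  | [] => ""  -- next() raises StopIteration here; excluded by Pre_
  | t :: ts =>
    let first := pvCapFirst t
    match ts.getLast? with
    | none => first ++ "."
    | some last => PySem.Str.join " " (first :: (ts.dropLast ++ [last ++ "."]))

-- ===== PRECONDITION & SPEC =====
-- Pre_ excludes only the empty list, on which A (and B) raise StopIteration.
def Pre_token_seq_repr (tokens : List String) : Prop := tokens ≠ []
instance (tokens : List String) : Decidable (Pre_token_seq_repr tokens) := by unfold Pre_token_seq_repr; infer_instance
def pvWitness_token_seq_repr : List String := (["hello", "there"])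
def Spec_token_seq_repr (tokens : List String) (out : String) : Prop := out = token_seq_repr_alt tokens
instance (tokens : List String) (out : String) : Decidable (Spec_token_seq_repr tokens out) := by unfold Spec_token_seq_repr; infer_instance

-- ===== CLAIM (what is proved, stated in full; the proofs are below) =====
def Claim_equal_token_seq_repr : Prop := ∀ (tokens : List String), Dom_token_seq_repr tokens → Pre_token_seq_repr tokens → Spec_token_seq_repr tokens (token_seq_repr tokens)

-- ===== LEMMAS AND PROOFS =====
-- the list A's loop builds: x :: ts with '.' appended to the last element
def pvMark (x : String) (ts : List String) : List String :=
  match ts with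
  | [] => [x ++ "."]
  | t :: ts => x :: pvMark t ts

theorem pvLoopA_eq_mark (ts : List String) : ∀ (x : String) (acc : List String),
    pvLoopA x ts acc = acc ++ pvMark x ts := by
  induction ts with
  | nil => intro x acc; simp [pvLoopA, pvMark]
  | cons t ts ih => intro x acc; simp [pvLoopA, pvMark, ih]

theorem pvMark_cons (x t : String) (ts : List String) :
    pvMark x (t :: ts) = x :: (t :: ts).dropLast ++ [(t :: ts).getLast (by simp) ++ "."] := by
  induction ts generalizing x t with
  | nil => simp [pvMark]
  | cons u us ih =>
    have := ih t u
    simp [pvMark] at this ⊢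
    rw [this]

theorem join_singleton_str (s : String) : PySem.Str.join " " [s] = s := by
  apply String.ext
  simp [PySem.Str.toList_join, PySem.Chars.join, List.intercalate]

-- ===== VERDICT (by name: the statement is the Claim_ definition above) =====
theorem token_seq_repr_spec : Claim_equal_token_seq_repr := by
  intro tokens _ hpre
  unfold Spec_token_seq_repr token_seq_repr token_seq_repr_alt
  match tokens with
  | [] => exact absurd rfl hpre
  | t :: ts =>
    cases ts with
    | nil =>
      simp [pvLoopA_eq_mark, pvMark, join_singleton_str]
    | cons u us =>
      simp only [pvLoopA_eq_mark, pvMark_cons, List.nil_append]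
      have hg : (u :: us).getLast? = some ((u :: us).getLast (by simp)) := by
        simp [List.getLast?_eq_some_getLast]
      rw [hg]
      simp
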